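-- pv_equiv track=rewrite | github.com/cmin0717/Algorithm | 프로그래머스/모음 사전.py | solution
-- ===== SOURCE A (Python) =====
-- def solution(word):
--     alpha = ['A','E','I','O','U']
--     cnt = 0
--     for a in alpha:
--         result = a
--         cnt += 1
--         if result == word : return cnt
--         for b in alpha:
--             result = a+b
--             cnt += 1
--             if result == word : return cnt
--             for c in alpha:
--                 result = a+b+c
--                 cnt += 1
--                 if result == word : return cnt
--                 for d in alpha:
--                     result = a+b+c+d
--                     cnt += 1
--                     if result == word : return cnt
--                     for e in alpha:
--                         result = a+b+c+d+e
--                         cnt += 1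
--                         if result == word : return cnt
-- ===== SOURCE B (Python) =====
-- def solution(word):
--     idx = {'A': 0, 'E': 1, 'I': 2, 'O': 3, 'U': 4}
--     if not (1 <= len(word) <= 5) or any(c not in idx for c in word):
--         return None
--     weights = [781, 156, 31, 6, 1]
--     return sum(idx[c] * weights[i] for i, c in enumerate(word)) + len(word)
-- ===== Notes on version B (the rewrite author's own statement) =====
-- stated objective: simpler
-- what changed: Replaces the five nested loops that enumerate all 3905 vowel words until the target is found with a closed-form rank: sum of vowel-index times positional subtree weight [781,156,31,6,1] plus the word length; Pre_ excludes the inputs (empty word, length > 5, non-vowel characters) on which A falls through and returns None instead of an int.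
-- outside the precondition, e.g. on solution('XYZ'): A returns None, B returns None
import Mathlib
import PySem

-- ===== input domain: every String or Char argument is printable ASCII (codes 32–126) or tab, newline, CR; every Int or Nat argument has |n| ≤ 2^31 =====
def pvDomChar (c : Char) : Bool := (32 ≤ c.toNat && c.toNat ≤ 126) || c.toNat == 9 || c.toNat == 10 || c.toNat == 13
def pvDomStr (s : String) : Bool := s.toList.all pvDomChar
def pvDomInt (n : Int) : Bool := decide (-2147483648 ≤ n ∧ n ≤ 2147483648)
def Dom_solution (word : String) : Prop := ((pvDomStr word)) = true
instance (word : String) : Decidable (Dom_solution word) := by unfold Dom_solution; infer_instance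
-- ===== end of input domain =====

-- B replaces A's five nested enumeration loops by a closed-form rank formula (weights 781,156,31,6,1).
-- A falls through returning None (not an Int) on invalid words; Pre_solution excludes exactly those.

-- ===== PORT A =====
-- A compares the built-up string 'result' with 'word'; we work on the character lists
-- (Python string equality/concatenation = list equality/append on toList).
def pvAlpha : List Char := ['A', 'E', 'I', 'O', 'U']

-- innermost loop (over e): 'result = a+b+c+d+e; cnt += 1; if result == word: return cnt'
def aRec5 (w p : List Char) (cnt : Int) : List Char → Sum Int Int
  | [] => .inr cnt
  | x :: xs => if p ++ [x] = w then .inl (cnt + 1) else aRec5 w p (cnt + 1) xs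

def aRec4 (w p : List Char) (cnt : Int) : List Char → Sum Int Int
  | [] => .inr cnt
  | x :: xs =>
    if p ++ [x] = w then .inl (cnt + 1) else
    match aRec5 w (p ++ [x]) (cnt + 1) pvAlpha with
    | .inl v => .inl v
    | .inr c' => aRec4 w p c' xs

def aRec3 (w p : List Char) (cnt : Int) : List Char → Sum Int Int
  | [] => .inr cnt
  | x :: xs =>
    if p ++ [x] = w then .inl (cnt + 1) else
    match aRec4 w (p ++ [x]) (cnt + 1) pvAlpha with
    | .inl v => .inl v
    | .inr c' => aRec3 w p c' xs

def aRec2 (w p : List Char) (cnt : Int) : List Char → Sum Int Int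
  | [] => .inr cnt
  | x :: xs =>
    if p ++ [x] = w then .inl (cnt + 1) else
    match aRec3 w (p ++ [x]) (cnt + 1) pvAlpha with
    | .inl v => .inl v
    | .inr c' => aRec2 w p c' xs

def aRec1 (w p : List Char) (cnt : Int) : List Char → Sum Int Int
  | [] => .inr cnt
  | x :: xs =>
    if p ++ [x] = w then .inl (cnt + 1) else
    match aRec2 w (p ++ [x]) (cnt + 1) pvAlpha with
    | .inl v => .inl v
    | .inr c' => aRec1 w p c' xs

def solution (word : String) : Int :=
  -- Python returns None when the loops fall through; that case is outside Pre_solution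
  match aRec1 word.toList [] 0 pvAlpha with
  | .inl v => v
  | .inr _ => 0

-- ===== PORT B =====
-- dict lookup idx[c] (guard ensures the key is present; 0 is an arbitrary default)
def vowelIdx (c : Char) : Int :=
  if c = 'A' then 0 else if c = 'E' then 1 else if c = 'I' then 2
  else if c = 'O' then 3 else if c = 'U' then 4 else 0

def pvWeights : List Int := [781, 156, 31, 6, 1]

-- sum(idx[c] * weights[i] for i, c in enumerate(word))
def bSum : List Int → List Char → Int
  | _, [] => 0
  | [], _ => 0
  | wt :: wts, c :: cs => vowelIdx c * wt + bSum wts cs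

def solution_alt (word : String) : Int :=
  let l := word.toList
  if 1 ≤ l.length ∧ l.length ≤ 5 ∧ l.all (· ∈ pvAlpha) = true then
    bSum pvWeights l + l.length
  else 0

-- ===== PRECONDITION & SPEC =====
-- Pre_ excludes exactly the inputs on which A returns None (no Int): the empty word,
-- words longer than 5, and words with a non-vowel character.
def Pre_solution (word : String) : Prop :=
  1 ≤ word.toList.length ∧ word.toList.length ≤ 5 ∧ word.toList.all (· ∈ pvAlpha) = true

instance (word : String) : Decidable (Pre_solution word) := by unfold Pre_solution; infer_instance

def pvWitness_solution : String := "AEU"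

def Spec_solution (word : String) (out : Int) : Prop := out = solution_alt word
instance (word : String) (out : Int) : Decidable (Spec_solution word out) := by unfold Spec_solution; infer_instance

-- ===== CLAIM (what is proved, stated in full; the proofs are below) =====
def Claim_equal_solution : Prop := ∀ (word : String), Dom_solution word → Pre_solution word → Spec_solution word (solution word)


-- ===== LEMMAS AND PROOFS =====

-- whole-subtree skip: if p is not a prefix of w, the loop at level K over `rest`
-- just advances the counter by rest.length * T_K (T_5=1, T_4=6, T_3=31, T_2=156).
lemma not_prefix_step {p w : List Char} (x : Char) (h : ¬ p <+: w) : ¬ p ++ [x] <+: w :=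
  fun hx => h ((List.prefix_append p [x]).trans hx)

lemma ne_of_not_prefix {p w : List Char} (x : Char) (h : ¬ p <+: w) : p ++ [x] ≠ w :=
  fun he => (not_prefix_step x h) (he ▸ List.prefix_refl _)

lemma skip5 (w p : List Char) (cnt : Int) (rest : List Char) (h : ¬ p <+: w) :
    aRec5 w p cnt rest = .inr (cnt + rest.length * 1) := by
  induction rest generalizing cnt with
  | nil => simp [aRec5]
  | cons x xs ih =>
    simp only [aRec5, if_neg (ne_of_not_prefix x h),
      ih, List.length_cons]
    congr 1
    push_cast [pvAlpha, List.length_cons, List.length_nil]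
    ring

lemma skip4 (w p : List Char) (cnt : Int) (rest : List Char) (h : ¬ p <+: w) :
    aRec4 w p cnt rest = .inr (cnt + rest.length * 6) := by
  induction rest generalizing cnt with
  | nil => simp [aRec4]
  | cons x xs ih =>
    simp only [aRec4, if_neg (ne_of_not_prefix x h),
      skip5 w (p ++ [x]) (cnt + 1) pvAlpha (not_prefix_step x h), ih, List.length_cons]
    congr 1
    push_cast [pvAlpha, List.length_cons, List.length_nil]
    ring

lemma skip3 (w p : List Char) (cnt : Int) (rest : List Char) (h : ¬ p <+: w) :
    aRec3 w p cnt rest = .inr (cnt + rest.length * 31) := by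
  induction rest generalizing cnt with
  | nil => simp [aRec3]
  | cons x xs ih =>
    simp only [aRec3, if_neg (ne_of_not_prefix x h),
      skip4 w (p ++ [x]) (cnt + 1) pvAlpha (not_prefix_step x h), ih, List.length_cons]
    congr 1
    push_cast [pvAlpha, List.length_cons, List.length_nil]
    ring

lemma skip2 (w p : List Char) (cnt : Int) (rest : List Char) (h : ¬ p <+: w) :
    aRec2 w p cnt rest = .inr (cnt + rest.length * 156) := by
  induction rest generalizing cnt with
  | nil => simp [aRec2]
  | cons x xs ih =>
    simp only [aRec2, if_neg (ne_of_not_prefix x h),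
      skip3 w (p ++ [x]) (cnt + 1) pvAlpha (not_prefix_step x h), ih, List.length_cons]
    congr 1
    push_cast [pvAlpha, List.length_cons, List.length_nil]
    ring

-- letters scanned before the matching one neither equal w nor prefix it
lemma ne_head_not_prefix {p : List Char} {y x : Char} {t : List Char} (hyx : ¬ y = x) :
    ¬ p ++ [y] <+: p ++ x :: t := by
  intro h
  rw [List.prefix_append_right_inj] at h
  exact hyx (List.cons_prefix_cons.mp h).1

lemma ne_head_ne {p : List Char} {y x : Char} {t : List Char} (hyx : ¬ y = x) :
    p ++ [y] ≠ p ++ x :: t := by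
  intro he
  have h2 := List.append_cancel_left he
  simp only [List.cons.injEq] at h2
  exact hyx h2.1

lemma idxOf_pvAlpha {x : Char} (hx : x ∈ pvAlpha) : (pvAlpha.idxOf x : Int) = vowelIdx x := by
  fin_cases hx <;> decide

-- hit: scanning `rest` for the next letter x of w = p ++ x :: t returns the
-- closed-form rank; each letter before x contributes one whole skipped subtree.
lemma loop5 (p : List Char) (cnt : Int) (x : Char) (t : List Char) (hlen : t.length ≤ 0)
    (_hv : ∀ c ∈ t, c ∈ pvAlpha) :
    ∀ rest : List Char, x ∈ rest →
      aRec5 (p ++ x :: t) p cnt rest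
        = .inl (cnt + rest.idxOf x * 1 + 1 + bSum ([] : List Int) t + t.length) := by
  intro rest hmem
  induction rest generalizing cnt with
  | nil => cases hmem
  | cons y ys ih =>
    by_cases hyx : y = x
    · subst hyx
      have ht : t = [] := by
        cases t with
        | nil => rfl
        | cons a b => simp at hlen
      subst ht
      rw [aRec5, if_pos rfl]
      simp [List.idxOf_cons_self, bSum]
    · have hm : x ∈ ys := by
        cases List.mem_cons.mp hmem with
        | inl h => exact absurd h.symm hyx
        | inr h => exact h
      simp only [aRec5, if_neg (ne_head_ne hyx),
        ih, hm, List.idxOf_cons_ne _ hyx]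
      congr 1
      push_cast [pvAlpha, List.length_cons, List.length_nil]
      ring

lemma loop4 (p : List Char) (cnt : Int) (x : Char) (t : List Char) (hlen : t.length ≤ 1)
    (hv : ∀ c ∈ t, c ∈ pvAlpha) :
    ∀ rest : List Char, x ∈ rest →
      aRec4 (p ++ x :: t) p cnt rest
        = .inl (cnt + rest.idxOf x * 6 + 1 + bSum [1] t + t.length) := by
  intro rest hmem
  induction rest generalizing cnt with
  | nil => cases hmem
  | cons y ys ih =>
    by_cases hyx : y = x
    · subst hyx
      rcases t with _ | ⟨z, u⟩
      · rw [aRec4, if_pos rfl]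
        simp [List.idxOf_cons_self, bSum]
      · rw [aRec4, if_neg (by intro he; have h2 := List.append_cancel_left he; simp at h2)]
        have h5 := loop5 (p ++ [y]) (cnt + 1) z u
          (by simp only [List.length_cons] at hlen; omega)
          (fun c hc => hv c (List.mem_cons_of_mem _ hc)) pvAlpha (hv z (List.mem_cons_self ..))
        simp only [List.append_assoc, List.cons_append, List.nil_append] at h5
        rw [h5]
        simp only [List.idxOf_cons_self, bSum, List.length_cons,
          idxOf_pvAlpha (hv z (List.mem_cons_self ..))]
        congr 1
        push_cast
        ring
    · have hm : x ∈ ys := by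
        cases List.mem_cons.mp hmem with
        | inl h => exact absurd h.symm hyx
        | inr h => exact h
      simp only [aRec4, if_neg (ne_head_ne hyx),
        skip5 (p ++ x :: t) (p ++ [y]) (cnt + 1) pvAlpha (ne_head_not_prefix hyx),
        ih, hm, List.idxOf_cons_ne _ hyx]
      congr 1
      push_cast [pvAlpha, List.length_cons, List.length_nil]
      ring

lemma loop3 (p : List Char) (cnt : Int) (x : Char) (t : List Char) (hlen : t.length ≤ 2)
    (hv : ∀ c ∈ t, c ∈ pvAlpha) :
    ∀ rest : List Char, x ∈ rest →
      aRec3 (p ++ x :: t) p cnt rest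
        = .inl (cnt + rest.idxOf x * 31 + 1 + bSum [6, 1] t + t.length) := by
  intro rest hmem
  induction rest generalizing cnt with
  | nil => cases hmem
  | cons y ys ih =>
    by_cases hyx : y = x
    · subst hyx
      rcases t with _ | ⟨z, u⟩
      · rw [aRec3, if_pos rfl]
        simp [List.idxOf_cons_self, bSum]
      · rw [aRec3, if_neg (by intro he; have h2 := List.append_cancel_left he; simp at h2)]
        have h5 := loop4 (p ++ [y]) (cnt + 1) z u
          (by simp only [List.length_cons] at hlen; omega)
          (fun c hc => hv c (List.mem_cons_of_mem _ hc)) pvAlpha (hv z (List.mem_cons_self ..))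
        simp only [List.append_assoc, List.cons_append, List.nil_append] at h5
        rw [h5]
        simp only [List.idxOf_cons_self, bSum, List.length_cons,
          idxOf_pvAlpha (hv z (List.mem_cons_self ..))]
        congr 1
        push_cast
        ring
    · have hm : x ∈ ys := by
        cases List.mem_cons.mp hmem with
        | inl h => exact absurd h.symm hyx
        | inr h => exact h
      simp only [aRec3, if_neg (ne_head_ne hyx),
        skip4 (p ++ x :: t) (p ++ [y]) (cnt + 1) pvAlpha (ne_head_not_prefix hyx),
        ih, hm, List.idxOf_cons_ne _ hyx]
      congr 1
      push_cast [pvAlpha, List.length_cons, List.length_nil]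
      ring

lemma loop2 (p : List Char) (cnt : Int) (x : Char) (t : List Char) (hlen : t.length ≤ 3)
    (hv : ∀ c ∈ t, c ∈ pvAlpha) :
    ∀ rest : List Char, x ∈ rest →
      aRec2 (p ++ x :: t) p cnt rest
        = .inl (cnt + rest.idxOf x * 156 + 1 + bSum [31, 6, 1] t + t.length) := by
  intro rest hmem
  induction rest generalizing cnt with
  | nil => cases hmem
  | cons y ys ih =>
    by_cases hyx : y = x
    · subst hyx
      rcases t with _ | ⟨z, u⟩
      · rw [aRec2, if_pos rfl]
        simp [List.idxOf_cons_self, bSum]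
      · rw [aRec2, if_neg (by intro he; have h2 := List.append_cancel_left he; simp at h2)]
        have h5 := loop3 (p ++ [y]) (cnt + 1) z u
          (by simp only [List.length_cons] at hlen; omega)
          (fun c hc => hv c (List.mem_cons_of_mem _ hc)) pvAlpha (hv z (List.mem_cons_self ..))
        simp only [List.append_assoc, List.cons_append, List.nil_append] at h5
        rw [h5]
        simp only [List.idxOf_cons_self, bSum, List.length_cons,
          idxOf_pvAlpha (hv z (List.mem_cons_self ..))]
        congr 1
        push_cast
        ring
    · have hm : x ∈ ys := by
        cases List.mem_cons.mp hmem with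
        | inl h => exact absurd h.symm hyx
        | inr h => exact h
      simp only [aRec2, if_neg (ne_head_ne hyx),
        skip3 (p ++ x :: t) (p ++ [y]) (cnt + 1) pvAlpha (ne_head_not_prefix hyx),
        ih, hm, List.idxOf_cons_ne _ hyx]
      congr 1
      push_cast [pvAlpha, List.length_cons, List.length_nil]
      ring

lemma loop1 (p : List Char) (cnt : Int) (x : Char) (t : List Char) (hlen : t.length ≤ 4)
    (hv : ∀ c ∈ t, c ∈ pvAlpha) :
    ∀ rest : List Char, x ∈ rest →
      aRec1 (p ++ x :: t) p cnt rest
        = .inl (cnt + rest.idxOf x * 781 + 1 + bSum [156, 31, 6, 1] t + t.length) := by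
  intro rest hmem
  induction rest generalizing cnt with
  | nil => cases hmem
  | cons y ys ih =>
    by_cases hyx : y = x
    · subst hyx
      rcases t with _ | ⟨z, u⟩
      · rw [aRec1, if_pos rfl]
        simp [List.idxOf_cons_self, bSum]
      · rw [aRec1, if_neg (by intro he; have h2 := List.append_cancel_left he; simp at h2)]
        have h5 := loop2 (p ++ [y]) (cnt + 1) z u
          (by simp only [List.length_cons] at hlen; omega)
          (fun c hc => hv c (List.mem_cons_of_mem _ hc)) pvAlpha (hv z (List.mem_cons_self ..))
        simp only [List.append_assoc, List.cons_append, List.nil_append] at h5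
        rw [h5]
        simp only [List.idxOf_cons_self, bSum, List.length_cons,
          idxOf_pvAlpha (hv z (List.mem_cons_self ..))]
        congr 1
        push_cast
        ring
    · have hm : x ∈ ys := by
        cases List.mem_cons.mp hmem with
        | inl h => exact absurd h.symm hyx
        | inr h => exact h
      simp only [aRec1, if_neg (ne_head_ne hyx),
        skip2 (p ++ x :: t) (p ++ [y]) (cnt + 1) pvAlpha (ne_head_not_prefix hyx),
        ih, hm, List.idxOf_cons_ne _ hyx]
      congr 1
      push_cast [pvAlpha, List.length_cons, List.length_nil]
      ring

-- ===== VERDICT (by name: the statement is the Claim_ definition above) =====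
theorem solution_spec : Claim_equal_solution := by
  intro word _ hpre
  obtain ⟨h1, h5, hvb⟩ := hpre
  have hv : ∀ c ∈ word.toList, c ∈ pvAlpha := by simpa using hvb
  unfold Spec_solution solution solution_alt
  rw [if_pos ⟨h1, h5, hvb⟩]
  obtain ⟨x, t, hl⟩ := List.exists_cons_of_ne_nil (List.length_pos_iff.mp (by omega) :
    word.toList ≠ [])
  have hx : x ∈ pvAlpha := hv x (hl ▸ List.mem_cons_self ..)
  have hvt : ∀ c ∈ t, c ∈ pvAlpha := fun c hc => hv c (hl ▸ List.mem_cons_of_mem _ hc)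
  have hlen : t.length ≤ 4 := by
    rw [hl, List.length_cons] at h5
    omega
  have hmain := loop1 [] 0 x t hlen hvt pvAlpha hx
  simp only [List.nil_append] at hmain
  rw [hl, hmain]
  simp only [bSum, pvWeights, List.length_cons, idxOf_pvAlpha hx]
  push_cast
  ring
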